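-- pv_equiv track=rewrite | github.com/uranbekanarbaev/homework_python | advanced/task2.py | words_index_map
-- ===== SOURCE A (Python) =====
-- def words_index_map(strings: list = None) -> dict:
--     """
--         The function calculates the words index map and gives the dictionary of words
--
--         Args:
--             list: an array with words
--
--         Returns:
--             dict: the number of words frequency
--     """
--     result = {}
--     for i, sentence in enumerate(strings):
--         for word in sentence.split():
--             if word not in result:
--                 result[word] = {i}
--             else:
--                 result[word].add(i)
--
--     return result
-- ===== SOURCE B (Python) =====
-- def words_index_map(strings: list = None) -> dict:
--     """Alternative implementation: materialise all (word, sentence-index) pairs,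
--     then group them per distinct word (first-occurrence key order)."""
--     pairs = [(w, i) for i, s in enumerate(strings) for w in s.split()]
--     return {w: {i for w2, i in pairs if w2 == w}
--             for w in dict.fromkeys(w for w, _ in pairs)}
-- ===== Notes on version B (the rewrite author's own statement) =====
-- stated objective: alternative
-- what changed: Replaces the incremental dict-of-sets insertion loop by a materialise-then-group pipeline: flatten all (word, index) pairs, dedupe words in first-occurrence order, and collect each word's indices by a per-word scan of the pair list.
import Mathlib
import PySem

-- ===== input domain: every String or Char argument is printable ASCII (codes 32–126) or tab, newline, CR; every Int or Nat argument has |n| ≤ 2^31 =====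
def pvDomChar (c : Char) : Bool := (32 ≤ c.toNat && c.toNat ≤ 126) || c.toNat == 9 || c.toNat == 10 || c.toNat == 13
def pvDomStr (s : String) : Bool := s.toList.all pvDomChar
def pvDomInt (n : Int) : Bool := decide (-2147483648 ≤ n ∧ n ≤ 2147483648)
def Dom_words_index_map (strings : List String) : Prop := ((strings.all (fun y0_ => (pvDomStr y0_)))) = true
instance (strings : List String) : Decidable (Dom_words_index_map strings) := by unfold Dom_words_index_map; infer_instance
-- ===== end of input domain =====

-- B replaces A's incremental dict-of-sets insertion loop by a materialise-then-group
-- pipeline (flatten all (word, index) pairs, dedupe words, per-word scans); objective: alternative.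


-- ===== PORT A =====
def words_index_map (strings : List String) : List (String × List Int) :=
  ((PySem.List.enumerate strings 0).foldl (fun result p =>
      (PySem.Str.split₀ p.2).foldl (fun result word =>
          if result.contains word = false then
            result.insert word (PySem.Set.ofList [p.1])
          else
            result.modify word [] (fun s => PySem.Set.add s p.1)) result)
    PySem.Dict.empty).items

-- ===== PORT B =====
def words_index_map_alt (strings : List String) : List (String × List Int) :=
  let pairs := (PySem.List.enumerate strings 0).flatMap
      (fun p => (PySem.Str.split₀ p.2).map (fun w => (w, p.1)))
  (PySem.List.dedup (pairs.map (·.1))).map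
    (fun w => (w, PySem.Set.ofList ((pairs.filter (fun q => q.1 == w)).map (·.2))))

-- ===== PRECONDITION & SPEC =====
def Spec_words_index_map (strings : List String) (out : List (String × List Int)) : Prop := out = words_index_map_alt strings
instance (strings : List String) (out : List (String × List Int)) : Decidable (Spec_words_index_map strings out) := by unfold Spec_words_index_map; infer_instance

-- ===== CLAIM (what is proved, stated in full; the proofs are below) =====
def Claim_equal_words_index_map : Prop := ∀ (strings : List String), Dom_words_index_map strings → Spec_words_index_map strings (words_index_map strings)

-- ===== LEMMAS AND PROOFS =====

-- A's two branches are both 'd.modify word [] (add · i)'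
lemma step_eq_modify (d : PySem.Dict String (List Int)) (w : String) (i : Int) :
    (if d.contains w = false then d.insert w (PySem.Set.ofList [i])
     else d.modify w [] (fun s => PySem.Set.add s i))
      = d.modify w [] (fun s => PySem.Set.add s i) := by
  by_cases h : d.contains w = false
  · have hg : d.getD w [] = [] := PySem.Dict.getD_of_not_contains d [] h
    simp only [PySem.Dict.insert, PySem.Dict.modify, h, hg]
    simp [PySem.Set.add, PySem.Set.contains, PySem.Set.ofList]
  · simp [h]

-- nested loop = flat loop over the flattened pair list
lemma foldl_flatMap_eq {α β γ : Type} (l : List α) (g : α → List β)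
    (f : γ → β → γ) (init : γ) :
    l.foldl (fun acc x => (g x).foldl f acc) init = (l.flatMap g).foldl f init := by
  induction l generalizing init with
  | nil => rfl
  | cons x xs ih => simp [List.flatMap_cons, List.foldl_append, ih]

-- value of the grouping fold at one key
lemma getD_fold_modify_add (ps : List (String × Int)) :
    ∀ (d : PySem.Dict String (List Int)) (w : String),
      (ps.foldl (fun d q => d.modify q.1 [] (fun s => PySem.Set.add s q.2)) d).getD w []
        = ((ps.filter (fun q => q.1 == w)).map (·.2)).foldl PySem.Set.add (d.getD w []) := by
  induction ps with
  | nil => intro d w; simp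
  | cons q ps ih =>
    intro d w
    rw [List.foldl_cons, ih]
    by_cases hw : q.1 = w
    · simp [hw]
    · rw [PySem.Dict.getD_modify]
      simp [hw, Ne.symm hw]

theorem main (strings : List String) :
    words_index_map strings = words_index_map_alt strings := by
  unfold words_index_map words_index_map_alt
  have h1 : (PySem.List.enumerate strings 0).foldl (fun result p =>
      (PySem.Str.split₀ p.2).foldl (fun result word =>
          if result.contains word = false then
            result.insert word (PySem.Set.ofList [p.1])
          else
            result.modify word [] (fun s => PySem.Set.add s p.1)) result)
      PySem.Dict.empty
    = ((PySem.List.enumerate strings 0).flatMap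
        (fun p => (PySem.Str.split₀ p.2).map (fun w => (w, p.1)))).foldl
        (fun d q => d.modify q.1 [] (fun s => PySem.Set.add s q.2)) PySem.Dict.empty := by
    rw [← foldl_flatMap_eq]
    apply PySem.List.foldl_congr_mem
    intro d p _
    rw [List.foldl_map]
    apply PySem.List.foldl_congr_mem
    intro d' w _
    exact step_eq_modify d' w p.1
  rw [h1]
  set ps := (PySem.List.enumerate strings 0).flatMap
      (fun p => (PySem.Str.split₀ p.2).map (fun w => (w, p.1))) with hps
  have hkeys : (ps.foldl (fun d q => d.modify q.1 [] (fun s => PySem.Set.add s q.2))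
      PySem.Dict.empty).keys = PySem.List.dedup (ps.map (·.1)) := by
    rw [PySem.Dict.keys_foldl_modify_key]
    simp [PySem.Dict.keys_empty, PySem.Set.update_nil_left]
  have hnd : (ps.foldl (fun d q => d.modify q.1 [] (fun s => PySem.Set.add s q.2))
      PySem.Dict.empty).keys.Nodup := by
    rw [hkeys]; exact PySem.List.nodup_dedup _
  rw [PySem.Dict.items_eq_map_keys _ hnd [], hkeys]
  apply List.map_congr_left
  intro w _
  rw [getD_fold_modify_add]
  simp [PySem.Dict.getD_empty, PySem.Set.ofList_eq_foldl]

-- ===== VERDICT (by name: the statement is the Claim_ definition above) =====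
theorem words_index_map_spec : Claim_equal_words_index_map := by
  intro strings _
  exact main strings
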